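-- pv_equiv track=rewrite | github.com/jonathonreilly/toy-physics | scripts/frontier_conformal_boundary.py | bipartition_boundary
-- ===== SOURCE A (Python) =====
-- def bipartition_boundary(boundary_sites: list[int],
--                          dims: tuple[int, ...],
--                          axis: int = 0) -> tuple[list[int], list[int]]:
--     """Split boundary sites into two halves along the first transverse axis.
--
--     For a (d-1)-dimensional boundary, split along the first axis that
--     is not the slicing axis.
--     """
--     ndim = len(dims)
--     # Find the first transverse axis
--     trans_axes = [a for a in range(ndim) if a != axis]
--     split_axis = trans_axes[0]
--     half = dims[split_axis] // 2
--
--     left = []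
--     right = []
--     for site in boundary_sites:
--         # Decode coordinates
--         coords = []
--         idx = site
--         for k in range(ndim - 1, -1, -1):
--             coords.append(idx % dims[k])
--             idx //= dims[k]
--         coords.reverse()
--
--         if coords[split_axis] < half:
--             left.append(site)
--         else:
--             right.append(site)
--     return left, right
-- ===== SOURCE B (Python) =====
-- def bipartition_boundary(boundary_sites: list[int],
--                          dims: tuple[int, ...],
--                          axis: int = 0) -> tuple[list[int], list[int]]:
--     """Split boundary sites into two halves along the first transverse axis.
--
--     Instead of decoding the full coordinate vector of every site, compute
--     only the one coordinate that matters: divide the site index by the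
--     dims that follow the split axis (from the last one backwards, so the
--     result matches mixed-radix decoding for any integer dims), then take
--     it modulo the split-axis extent.
--     """
--     split_axis = 1 if axis == 0 else 0
--     half = dims[split_axis] // 2
--     rtail = dims[split_axis + 1:][::-1]
--
--     left = []
--     right = []
--     for site in boundary_sites:
--         idx = site
--         for d in rtail:
--             idx //= d
--         if idx % dims[split_axis] < half:
--             left.append(site)
--         else:
--             right.append(site)
--     return left, right
-- ===== Notes on version B (the rewrite author's own statement) =====
-- stated objective: simpler
-- what changed: B never builds the per-site coordinate list: it extracts only the split-axis coordinate by floor-dividing the site index through the trailing dims (precomputed, reversed, once) and taking one modulus, dropping the full decode, the coords list and the reverse.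
import Mathlib
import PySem

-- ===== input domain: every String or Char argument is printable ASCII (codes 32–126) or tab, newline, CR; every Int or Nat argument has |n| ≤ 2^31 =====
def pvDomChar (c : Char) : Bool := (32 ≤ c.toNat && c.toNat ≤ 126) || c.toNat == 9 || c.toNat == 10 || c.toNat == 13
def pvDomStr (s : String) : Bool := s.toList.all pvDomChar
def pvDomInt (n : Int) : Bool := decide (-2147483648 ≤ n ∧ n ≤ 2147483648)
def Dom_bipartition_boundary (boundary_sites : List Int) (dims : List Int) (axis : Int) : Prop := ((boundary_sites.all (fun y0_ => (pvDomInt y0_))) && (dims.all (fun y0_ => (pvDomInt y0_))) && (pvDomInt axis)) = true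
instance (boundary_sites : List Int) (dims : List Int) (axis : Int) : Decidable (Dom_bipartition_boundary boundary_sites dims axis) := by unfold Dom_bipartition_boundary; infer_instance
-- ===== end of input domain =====

-- B is simpler: it extracts only the split-axis coordinate (floor-divide through the
-- trailing dims, one modulus) instead of decoding, reversing and indexing the full
-- per-site coordinate list. Return values only; neither program mutates its arguments.

-- ===== PORT A =====
def bipartition_boundary (boundary_sites : List Int) (dims : List Int) (axis : Int) : List Int × List Int :=
  let ndim : Int := (dims.length : Int)
  let trans_axes : List Int := (PySem.List.pyRange 0 ndim 1).filter (fun a => a ≠ axis)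
  match PySem.List.pyGet? trans_axes 0 with
  | none => ([], [])   -- Python raises IndexError here; excluded by Pre_
  | some split_axis =>
    let half : Int := PySem.Int.floordiv (PySem.List.pyGetD dims split_axis 0) 2
    boundary_sites.foldl (fun (lr : List Int × List Int) site =>
      let p : List Int × Int := (PySem.List.pyRange (ndim - 1) (-1) (-1)).foldl
        (fun (st : List Int × Int) k =>
          (st.1 ++ [PySem.Int.mod st.2 (PySem.List.pyGetD dims k 0)],
           PySem.Int.floordiv st.2 (PySem.List.pyGetD dims k 0)))
        ([], site)
      let coords : List Int := p.1.reverse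
      if PySem.List.pyGetD coords split_axis 0 < half then (lr.1 ++ [site], lr.2)
      else (lr.1, lr.2 ++ [site])) ([], [])

-- ===== PORT B =====
def bipartition_boundary_alt (boundary_sites : List Int) (dims : List Int) (axis : Int) : List Int × List Int :=
  let split : Nat := if axis = 0 then 1 else 0
  let half : Int := PySem.Int.floordiv (PySem.List.pyGetD dims (split : Int) 0) 2
  let rtail : List Int := (dims.drop (split + 1)).reverse   -- dims[split+1:][::-1]
  boundary_sites.foldl (fun (lr : List Int × List Int) site =>
    if PySem.Int.mod (rtail.foldl PySem.Int.floordiv site) (PySem.List.pyGetD dims (split : Int) 0) < half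
    then (lr.1 ++ [site], lr.2)
    else (lr.1, lr.2 ++ [site])) ([], [])

-- ===== PRECONDITION & SPEC =====
-- Pre_ excludes exactly the inputs on which Python A raises: no transverse axis
-- (IndexError), or a zero dim while there is at least one site to decode
-- (ZeroDivisionError in the per-site loop); no input on which A returns is excluded
-- (with no sites A divides by nothing and returns ([],[]) even when a dim is 0).
def Pre_bipartition_boundary (boundary_sites : List Int) (dims : List Int) (axis : Int) : Prop :=
  (if axis = 0 then 2 ≤ dims.length else 1 ≤ dims.length)
  ∧ (boundary_sites = [] ∨ ∀ d ∈ dims, d ≠ 0)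
instance (boundary_sites : List Int) (dims : List Int) (axis : Int) : Decidable (Pre_bipartition_boundary boundary_sites dims axis) := by unfold Pre_bipartition_boundary; infer_instance
def pvWitness_bipartition_boundary : List Int × List Int × Int := ([0, 1, 2, 3, 4, 5], [2, 3], 0)

def Spec_bipartition_boundary (boundary_sites : List Int) (dims : List Int) (axis : Int) (out : List Int × List Int) : Prop := out = bipartition_boundary_alt boundary_sites dims axis
instance (boundary_sites : List Int) (dims : List Int) (axis : Int) (out : List Int × List Int) : Decidable (Spec_bipartition_boundary boundary_sites dims axis out) := by unfold Spec_bipartition_boundary; infer_instance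

-- ===== CLAIM (what is proved, stated in full; the proofs are below) =====
def Claim_equal_bipartition_boundary : Prop := ∀ (boundary_sites : List Int) (dims : List Int) (axis : Int), Dom_bipartition_boundary boundary_sites dims axis → Pre_bipartition_boundary boundary_sites dims axis → Spec_bipartition_boundary boundary_sites dims axis (bipartition_boundary boundary_sites dims axis)
-- ===== LEMMAS AND PROOFS =====

-- Forward-order mixed-radix decode (the value A's inner fold accumulates).
def pvDecode : List Int → Int → List Int
  | [], _ => []
  | d :: ds, i => PySem.Int.mod i d :: pvDecode ds (PySem.Int.floordiv i d)

theorem pvDecode_length (ds : List Int) (i : Int) : (pvDecode ds i).length = ds.length := by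
  induction ds generalizing i with
  | nil => rfl
  | cons d ds ih => simp [pvDecode, ih]

theorem pvDecode_getElem (ds : List Int) (i : Int) (j : Nat) (hj : j < ds.length) :
    (pvDecode ds i)[j]'(by rw [pvDecode_length]; exact hj)
      = PySem.Int.mod ((ds.take j).foldl PySem.Int.floordiv i) (ds[j]'hj) := by
  induction ds generalizing i j with
  | nil => simp at hj
  | cons d ds ih =>
    cases j with
    | zero => simp [pvDecode]
    | succ j => simpa [pvDecode] using ih (PySem.Int.floordiv i d) j (by simpa using hj)

-- A's inner fold (append coord, floor-divide) over any list, from any accumulator.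
theorem pvFold_eq_decode (ds : List Int) (cs : List Int) (i : Int) :
    ds.foldl (fun (st : List Int × Int) d =>
        (st.1 ++ [PySem.Int.mod st.2 d], PySem.Int.floordiv st.2 d)) (cs, i)
      = (cs ++ pvDecode ds i, ds.foldl PySem.Int.floordiv i) := by
  induction ds generalizing cs i with
  | nil => simp [pvDecode]
  | cons d ds ih => simp [pvDecode, ih]

theorem pvCoord_eq (dims : List Int) (s : Nat) (hs : s + 1 ≤ dims.length) (site : Int) :
    PySem.List.pyGetD ((pvDecode dims.reverse site).reverse) (s : Int) 0
      = PySem.Int.mod (((dims.drop (s+1)).reverse).foldl PySem.Int.floordiv site)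
          (PySem.List.pyGetD dims (s : Int) 0) := by
  have hlen : (pvDecode dims.reverse site).length = dims.length := by
    rw [pvDecode_length, List.length_reverse]
  have hs1 : s < (pvDecode dims.reverse site).reverse.length := by simp [hlen]; omega
  have hs2 : s < dims.length := by omega
  rw [PySem.List.pyGetD_natCast, PySem.List.pyGetD_natCast,
      List.getD_eq_getElem _ _ hs1, List.getD_eq_getElem _ _ hs2,
      List.getElem_reverse]
  have hj : (pvDecode dims.reverse site).length - 1 - s < dims.reverse.length := by
    simp [hlen]; omega
  rw [show ((pvDecode dims.reverse site)[(pvDecode dims.reverse site).length - 1 - s]'(by omega) )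
      = (pvDecode dims.reverse site)[dims.length - 1 - s]'(by omega) from by congr 1; omega]
  rw [pvDecode_getElem dims.reverse site (dims.length - 1 - s) (by simp; omega)]
  congr 1
  · congr 1
    rw [List.reverse_drop]
    congr 1
    omega
  · rw [List.getElem_reverse]
    congr 1
    omega

theorem pvSplit_eq (dims : List Int) (axis : Int)
    (h : if axis = 0 then 2 ≤ dims.length else 1 ≤ dims.length) :
    PySem.List.pyGet? ((PySem.List.pyRange 0 (dims.length : Int) 1).filter (fun a => a ≠ axis)) 0
      = some ((if axis = 0 then 1 else 0 : Nat) : Int) := by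
  by_cases hax : axis = 0
  · subst hax
    rw [if_pos rfl] at h
    rw [PySem.List.pyRange_one_cons (a := 0) (b := (dims.length : Int)) (by omega),
        show (0:Int)+1 = 1 from rfl,
        PySem.List.pyRange_one_cons (a := 1) (b := (dims.length : Int)) (by omega)]
    simp [List.filter, pysem]
  · rw [if_neg hax] at h
    rw [PySem.List.pyRange_one_cons (a := 0) (b := (dims.length : Int)) (by omega)]
    simp [List.filter, hax, Ne.symm hax, pysem]

-- ===== VERDICT (by name: the statement is the Claim_ definition above) =====
theorem bipartition_boundary_spec : Claim_equal_bipartition_boundary := by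
  intro bs dims axis _ hpre
  unfold Spec_bipartition_boundary
  obtain ⟨h1, _⟩ := hpre
  have hsn : (if axis = 0 then 1 else 0 : Nat) + 1 ≤ dims.length := by
    by_cases hax : axis = 0 <;> simp only [hax, if_true, if_false] at h1 ⊢ <;> omega
  have hks : (PySem.List.pyRange ((dims.length : Int) - 1) (-1) (-1)).map
      (fun k => PySem.List.pyGetD dims k 0) = dims.reverse := by
    rw [PySem.List.pyRange_neg_one_eq_reverse, show (-1 : Int) + 1 = 0 from rfl,
        show ((dims.length : Int) - 1) + 1 = (dims.length : Int) from by ring,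
        List.map_reverse, PySem.List.map_pyGetD_pyRange_zero']
  simp only [bipartition_boundary, bipartition_boundary_alt, pvSplit_eq dims axis h1]
  congr 1
  funext lr site
  rw [← List.foldl_map (f := fun k => PySem.List.pyGetD dims k 0)
        (g := fun (st : List Int × Int) d =>
          (st.1 ++ [PySem.Int.mod st.2 d], PySem.Int.floordiv st.2 d)),
      hks, pvFold_eq_decode, List.nil_append,
      pvCoord_eq dims _ hsn site]
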